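-- pv_equiv track=rewrite | github.com/Workflomics/clindaws | clindaws/translators/ports.py | _group_port_values_by_dimension
-- ===== SOURCE A (Python) =====
-- from collections import defaultdict
--
-- def _group_port_values_by_dimension(
--     port_values: tuple[tuple[str, str], ...],
-- ) -> dict[str, tuple[str, ...]]:
--     grouped: dict[str, list[str]] = defaultdict(list)
--     for dim, value in port_values:
--         grouped[dim].append(value)
--     return {
--         dim: tuple(values)
--         for dim, values in grouped.items()
--     }
-- ===== SOURCE B (Python) =====
-- def _group_port_values_by_dimension(
--     port_values: tuple[tuple[str, str], ...],
-- ) -> dict[str, tuple[str, ...]]: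
--     dims = dict.fromkeys(dim for dim, _ in port_values)
--     return {
--         dim: tuple(value for d, value in port_values if d == dim)
--         for dim in dims
--     }
-- ===== Notes on version B (the rewrite author's own statement) =====
-- stated objective: idiomatic
-- what changed: Replaces the defaultdict single-pass aggregation by an ordered dedup of the dimension keys followed by one filtering pass over port_values per distinct key (no intermediate mutable dict).
import Mathlib
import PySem

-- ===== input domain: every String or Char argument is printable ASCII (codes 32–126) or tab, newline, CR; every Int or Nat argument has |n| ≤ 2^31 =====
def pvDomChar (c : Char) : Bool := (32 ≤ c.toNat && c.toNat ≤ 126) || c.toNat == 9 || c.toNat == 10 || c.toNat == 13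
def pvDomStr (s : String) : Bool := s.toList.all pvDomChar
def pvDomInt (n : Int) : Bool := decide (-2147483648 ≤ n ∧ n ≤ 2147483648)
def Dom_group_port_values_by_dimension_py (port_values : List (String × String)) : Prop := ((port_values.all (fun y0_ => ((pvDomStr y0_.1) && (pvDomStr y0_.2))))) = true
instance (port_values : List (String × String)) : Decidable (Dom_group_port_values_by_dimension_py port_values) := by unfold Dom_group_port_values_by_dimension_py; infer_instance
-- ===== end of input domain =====

-- B replaces A's single-pass defaultdict aggregation by an ordered dedup of the keys plus one
-- filtering pass per distinct key (idiomatic; same results, no mutable dict).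

-- ===== PORT A =====
-- grouped = defaultdict(list); for dim, value: grouped[dim].append(value); then dict comprehension
def group_port_values_by_dimension_py (port_values : List (String × String)) : List (String × List String) :=
  let grouped : PySem.Dict String (List String) :=
    port_values.foldl (fun d p => d.modify p.1 [] (· ++ [p.2])) PySem.Dict.empty
  grouped.items.map (fun p => (p.1, p.2))  -- tuple(values) is the identity on List String

-- ===== PORT B =====
-- dims = dict.fromkeys(...); {dim: tuple(v for d, v in port_values if d == dim) for dim in dims}
def group_port_values_by_dimension_py_alt (port_values : List (String × String)) : List (String × List String) :=
  let dims := PySem.List.dedup (port_values.map Prod.fst)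
  dims.map (fun dim => (dim, (port_values.filter (fun p => p.1 == dim)).map Prod.snd))

-- ===== PRECONDITION & SPEC =====
def Spec_group_port_values_by_dimension_py (port_values : List (String × String)) (out : List (String × List String)) : Prop := out = group_port_values_by_dimension_py_alt port_values
instance (port_values : List (String × String)) (out : List (String × List String)) : Decidable (Spec_group_port_values_by_dimension_py port_values out) := by unfold Spec_group_port_values_by_dimension_py; infer_instance

-- ===== CLAIM (what is proved, stated in full; the proofs are below) =====
def Claim_equal_group_port_values_by_dimension_py : Prop := ∀ (port_values : List (String × String)), Dom_group_port_values_by_dimension_py port_values → Spec_group_port_values_by_dimension_py port_values (group_port_values_by_dimension_py port_values)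

-- ===== LEMMAS AND PROOFS =====

-- ===== VERDICT (by name: the statement is the Claim_ definition above) =====
theorem group_port_values_by_dimension_py_spec : Claim_equal_group_port_values_by_dimension_py := by
  intro pv _
  unfold Spec_group_port_values_by_dimension_py
  unfold group_port_values_by_dimension_py group_port_values_by_dimension_py_alt
  set grouped : PySem.Dict String (List String) :=
    pv.foldl (fun d p => d.modify p.1 [] (· ++ [p.2])) PySem.Dict.empty with hg
  have hnd : grouped.keys.Nodup := by
    rw [hg]
    exact PySem.Dict.nodup_keys_foldl_modify_key pv Prod.fst [] (fun _ p v => v ++ [p.2])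
      PySem.Dict.empty PySem.Dict.nodup_keys_empty
  have hkeys : grouped.keys = PySem.List.dedup (pv.map Prod.fst) := by
    rw [hg, PySem.Dict.keys_foldl_modify_key, PySem.Dict.keys_empty,
      PySem.Set.update_nil_left, PySem.List.dedup_eq_ofList]
  show grouped.items.map (fun p => (p.1, p.2)) = _
  rw [PySem.Dict.items_eq_map_keys grouped hnd [], hkeys]
  simp only [List.map_map]
  refine List.map_congr_left ?_
  intro k _
  simp only [Function.comp]
  rw [hg, PySem.Dict.getD_foldl_modify_append, PySem.Dict.getD_empty]
  simp
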